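-- pv_equiv track=rewrite | github.com/Luke1298/MathAce | python/utils/utils.py | number_nxt_var
-- ===== SOURCE A (Python) =====
-- numbers = ['1','2','3','4','5','6','7','8','9','0']
--
-- def number_nxt_var(function, var):
--   new_fun=""
--   c=1
--   for y in function:
--     if (c<(len(function)) and y in numbers and function[c]==var):
--       new_fun+=y
--       new_fun+='*'
--     else:
--       new_fun+=y
--     c+=1
--   return new_fun
-- ===== SOURCE B (Python) =====
-- def number_nxt_var(function, var):
--   # Staged approach: split on the variable and rejoin, deciding at each
--   # boundary (from the last character already emitted) whether to insert '*'.
--   if len(var) != 1: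
--     return function  # a single char of function can never equal var: no insertions
--   parts = function.split(var)
--   out = parts[0]
--   for part in parts[1:]:
--     if out and out[-1] in '0123456789':
--       out += '*'
--     out += var + part
--   return out
-- ===== Notes on version B (the rewrite author's own statement) =====
-- stated objective: alternative
-- what changed: Replaces A's per-character scan with counter-guarded lookahead by a staged split/rejoin: split the string on var and rejoin the parts, deciding at each boundary (from the last emitted character) whether to insert '*'; non-single-character var is returned unchanged since a one-character comparison can never match it.
import Mathlib
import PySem

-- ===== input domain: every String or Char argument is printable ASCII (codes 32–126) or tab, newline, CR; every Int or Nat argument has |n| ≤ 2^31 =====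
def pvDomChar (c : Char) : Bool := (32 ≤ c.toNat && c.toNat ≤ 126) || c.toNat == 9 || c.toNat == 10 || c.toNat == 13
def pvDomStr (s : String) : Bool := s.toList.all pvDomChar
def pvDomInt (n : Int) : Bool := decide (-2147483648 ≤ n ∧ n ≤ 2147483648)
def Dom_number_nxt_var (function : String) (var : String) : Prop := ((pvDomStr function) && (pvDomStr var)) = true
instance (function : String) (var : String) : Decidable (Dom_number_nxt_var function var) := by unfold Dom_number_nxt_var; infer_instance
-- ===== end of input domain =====

-- B replaces A's per-character index-counter scan with a split-on-var / rejoin pass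
-- (objective: alternative); same return value everywhere.

-- ===== PORT A =====
-- module constant 'numbers'
def pvNumbers : List Char := ['1','2','3','4','5','6','7','8','9','0']

-- for y in function: counter c starts at 1; function[c] is guarded by c < len(function)
def number_nxt_var (function : String) (var : String) : String :=
  String.ofList ((function.toList.foldl (fun (st : List Char × Nat) y =>
      if st.2 < function.toList.length ∧ y ∈ pvNumbers ∧ String.ofList [function.toList.getD st.2 ' '] = var
      then (st.1 ++ [y, '*'], st.2 + 1)
      else (st.1 ++ [y], st.2 + 1))
    ([], 1)).1)

-- ===== PORT B =====
-- the string literal '0123456789' as chars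
def pvDigits : List Char := ['0','1','2','3','4','5','6','7','8','9']

-- if len(var) != 1: return function
-- parts = function.split(var); out = parts[0]
-- for part in parts[1:]: if out and out[-1] in '0123456789': out += '*'; out += var + part
-- ('out and out[-1] in …' ported as 'out ≠ [] ∧ out.getLastD _ ∈ pvDigits', exact: out[-1] of a nonempty list is its last element)
def number_nxt_var_alt (function : String) (var : String) : String :=
  if PySem.Str.len var ≠ 1 then function
  else
    let parts := PySem.Chars.splitOn function.toList var.toList
    String.ofList ((PySem.List.slice parts (some 1) none).foldl
      (fun out part =>
        (if out ≠ [] ∧ out.getLastD ' ' ∈ pvDigits then out ++ ['*'] else out) ++ var.toList ++ part)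
      (parts.headD []))

-- ===== PRECONDITION & SPEC =====
def Spec_number_nxt_var (function : String) (var : String) (out : String) : Prop := out = number_nxt_var_alt function var
instance (function : String) (var : String) (out : String) : Decidable (Spec_number_nxt_var function var out) := by unfold Spec_number_nxt_var; infer_instance

-- ===== CLAIM (what is proved, stated in full; the proofs are below) =====
def Claim_equal_number_nxt_var : Prop := ∀ (function : String) (var : String), Dom_number_nxt_var function var → Spec_number_nxt_var function var (number_nxt_var function var)

-- ===== LEMMAS AND PROOFS =====

-- common recursive description of the output characters
def pvSeg (l : List Char) (var : String) : List Char :=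
  match l with
  | [] => []
  | [y] => [y]
  | y :: n :: t => (if y ∈ pvDigits ∧ String.ofList [n] = var then [y, '*'] else [y]) ++ pvSeg (n :: t) var

lemma pvMemNumbers (y : Char) : y ∈ pvNumbers ↔ y ∈ pvDigits := by
  simp [pvNumbers, pvDigits]; tauto

-- A's loop computes pvSeg
lemma pvA_loop (fl : List Char) (var : String) :
    ∀ (rest : List Char) (k : Nat) (acc : List Char), fl.drop k = rest →
    rest.foldl (fun (st : List Char × Nat) y =>
      if st.2 < fl.length ∧ y ∈ pvNumbers ∧ String.ofList [fl.getD st.2 ' '] = var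
      then (st.1 ++ [y, '*'], st.2 + 1)
      else (st.1 ++ [y], st.2 + 1)) (acc, k + 1)
    = (acc ++ pvSeg rest var, k + 1 + rest.length) := by
  intro rest
  induction rest with
  | nil => intro k acc _; simp [pvSeg]
  | cons y rest' ih =>
    intro k acc hdrop
    have hk : k < fl.length := by
      by_contra h
      simp [List.drop_eq_nil_of_le (Nat.le_of_not_lt h)] at hdrop
    have hlen : fl.length = k + 1 + rest'.length := by
      have := congrArg List.length hdrop
      simp [List.length_drop] at this
      omega
    have hdrop' : fl.drop (k + 1) = rest' := by
      have : (fl.drop k).tail = fl.drop (k + 1) := by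
        rw [List.tail_drop]
      rw [← this, hdrop]; rfl
    simp only [List.foldl_cons]
    match rest' with
    | [] =>
      have hguard : ¬ (k + 1 < fl.length ∧ y ∈ pvNumbers ∧ String.ofList [fl.getD (k + 1) ' '] = var) := by
        intro ⟨h1, _⟩; simp at hlen; omega
      rw [if_neg hguard]
      simp [pvSeg]
    | n :: t =>
      have hget : fl.getD (k + 1) ' ' = n := by
        have h0 : (fl.drop (k+1))[0]? = fl[k+1]? := by
          simp [List.getElem?_drop]
        rw [hdrop'] at h0
        simp at h0
        simp [List.getD_eq_getElem?_getD, ← h0]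
      have hguard : (k + 1 < fl.length ∧ y ∈ pvNumbers ∧ String.ofList [fl.getD (k + 1) ' '] = var)
          ↔ (y ∈ pvDigits ∧ String.ofList [n] = var) := by
        rw [hget, pvMemNumbers]
        constructor
        · rintro ⟨_, h2, h3⟩; exact ⟨h2, h3⟩
        · rintro ⟨h2, h3⟩; exact ⟨by simp at hlen ⊢; omega, h2, h3⟩
      by_cases hc : y ∈ pvDigits ∧ String.ofList [n] = var
      · rw [if_pos (hguard.mpr hc), ih (k + 1) (acc ++ [y, '*']) hdrop']
        simp [pvSeg, hc]
        omega
      · rw [if_neg (fun h => hc (hguard.mp h)), ih (k + 1) (acc ++ [y]) hdrop']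
        simp [pvSeg, hc]
        omega

-- if len(var) ≠ 1 no comparison 'function[c] == var' can succeed, so pvSeg is the identity
lemma pvSeg_id (l : List Char) (var : String) (h : var.toList.length ≠ 1) : pvSeg l var = l := by
  induction l with
  | nil => rfl
  | cons y t ih =>
    match t with
    | [] => rfl
    | n :: t' =>
      have hne : ¬ (y ∈ pvDigits ∧ String.ofList [n] = var) := by
        rintro ⟨-, h2⟩
        apply h
        rw [← h2]
        simp
      simp only [pvSeg, if_neg hne, List.singleton_append]
      rw [ih]

-- recursive form of str.split for a single-character separator
def pvSplit1 (l : List Char) (v : Char) : List (List Char) :=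
  match l with
  | [] => [[]]
  | c :: t => if c = v then [] :: pvSplit1 t v else (pvSplit1 t v).modifyHead (c :: ·)

lemma pvSplit1_ne_nil (l : List Char) (v : Char) : pvSplit1 l v ≠ [] := by
  cases l with
  | nil => simp [pvSplit1]
  | cons c t =>
    simp only [pvSplit1]
    split_ifs
    · simp
    · cases h : pvSplit1 t v with
      | nil => simp [pvSplit1_ne_nil t v] at h
      | cons a b => simp

lemma pvSplitOn_go (v : Char) :
    ∀ (fuel : Nat) (l cur : List Char) (acc : List (List Char)), l.length ≤ fuel →
    PySem.Chars.splitOn.go [v] fuel l cur acc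
      = acc.reverse ++ (pvSplit1 l v).modifyHead (cur.reverse ++ ·) := by
  intro fuel
  induction fuel with
  | zero =>
    intro l cur acc hl
    have : l = [] := List.length_eq_zero_iff.mp (Nat.le_zero.mp hl)
    subst this
    simp [PySem.Chars.splitOn.go, pvSplit1]
  | succ f ih =>
    intro l cur acc hl
    cases l with
    | nil => simp [PySem.Chars.splitOn.go, pvSplit1]
    | cons c rest =>
      rw [show PySem.Chars.splitOn.go [v] (f + 1) (c :: rest) cur acc
          = if [v].isPrefixOf (c :: rest) = true
            then PySem.Chars.splitOn.go [v] f (List.drop [v].length (c :: rest)) [] (cur.reverse :: acc)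
            else PySem.Chars.splitOn.go [v] f rest (c :: cur) acc from rfl]
      have hrest : rest.length ≤ f := by simp at hl; omega
      by_cases hc : c = v
      · have hpre : [v].isPrefixOf (c :: rest) = true := by simp [List.isPrefixOf, hc]
        rw [if_pos hpre, show List.drop [v].length (c :: rest) = rest from rfl,
          ih rest [] (cur.reverse :: acc) hrest]
        simp [pvSplit1, hc]
        cases pvSplit1 rest v <;> simp
      · have hpre : ¬ [v].isPrefixOf (c :: rest) = true := by simp [List.isPrefixOf]; exact fun h => hc h.symm
        rw [if_neg hpre, ih rest (c :: cur) acc hrest]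
        simp only [pvSplit1, if_neg hc]
        obtain ⟨h, t, ht⟩ : ∃ h t, pvSplit1 rest v = h :: t := by
          cases hh : pvSplit1 rest v with
          | nil => exact absurd hh (pvSplit1_ne_nil rest v)
          | cons a b => exact ⟨a, b, rfl⟩
        simp [ht]

lemma pvSplitOn_eq (l : List Char) (v : Char) :
    PySem.Chars.splitOn l [v] = pvSplit1 l v := by
  rw [show PySem.Chars.splitOn l [v] = PySem.Chars.splitOn.go [v] (l.length + 1) l [] [] from rfl]
  rw [pvSplitOn_go v (l.length + 1) l [] [] (by omega)]
  cases h : pvSplit1 l v <;> simp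

-- B's rejoin fold over the split, with an arbitrary already-emitted prefix p, computes pvSeg
lemma pvB_run (v : Char) (l : List Char) :
    ∀ p : List Char,
    (pvSplit1 l v).tail.foldl
      (fun out part =>
        (if out ≠ [] ∧ out.getLastD ' ' ∈ pvDigits then out ++ ['*'] else out) ++ [v] ++ part)
      (p ++ (pvSplit1 l v).headD [])
    = p ++ (if l.headD ' ' = v ∧ l ≠ [] ∧ p ≠ [] ∧ p.getLastD ' ' ∈ pvDigits then ['*'] else [])
        ++ pvSeg l (String.ofList [v]) := by
  induction l with
  | nil => intro p; simp [pvSplit1, pvSeg]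
  | cons c t ih =>
    intro p
    by_cases hc : c = v
    · subst hc
      simp only [pvSplit1, if_true, true_and, List.tail_cons, List.headD_cons,
        List.append_nil]
      obtain ⟨h, t', ht⟩ : ∃ h t', pvSplit1 t c = h :: t' := by
        cases hh : pvSplit1 t c with
        | nil => exact absurd hh (pvSplit1_ne_nil t c)
        | cons a b => exact ⟨a, b, rfl⟩
      rw [ht, List.foldl_cons]
      have step : (if p ≠ [] ∧ p.getLastD ' ' ∈ pvDigits then p ++ ['*'] else p) ++ [c] ++ h
          = (p ++ (if p ≠ [] ∧ p.getLastD ' ' ∈ pvDigits then ['*'] else []) ++ [c]) ++ h := by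
        split_ifs <;> simp
      rw [step]
      have ih' := ih (p ++ (if p ≠ [] ∧ p.getLastD ' ' ∈ pvDigits then ['*'] else []) ++ [c])
      rw [ht] at ih'
      simp only [List.headD_cons, List.tail_cons] at ih'
      rw [ih']
      match t with
      | [] =>
        simp [pvSeg]
      | n :: t'' =>
        have hsingle : (String.ofList [n] = String.ofList [c]) ↔ n = c := by
          constructor
          · intro hh
            have := congrArg String.toList hh
            simpa using this
          · intro hh; rw [hh]
        simp only [pvSeg, List.headD_cons, ne_eq, List.cons_ne_nil, not_false_eq_true,
          List.append_ne_nil_of_right_ne_nil, List.getLastD_concat, true_and, hsingle]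
        by_cases hn : n = c <;> by_cases hd : c ∈ pvDigits <;>
          simp [hn, hd]
    · simp only [pvSplit1, if_neg hc]
      obtain ⟨h, t', ht⟩ : ∃ h t', pvSplit1 t v = h :: t' := by
        cases hh : pvSplit1 t v with
        | nil => exact absurd hh (pvSplit1_ne_nil t v)
        | cons a b => exact ⟨a, b, rfl⟩
      rw [ht]
      simp only [List.modifyHead_cons, List.tail_cons, List.headD_cons]
      have harr : p ++ (c :: h) = (p ++ [c]) ++ h := by simp
      rw [harr]
      have ih' := ih (p ++ [c])
      rw [ht] at ih'
      simp only [List.tail_cons, List.headD_cons] at ih'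
      rw [ih']
      match t with
      | [] =>
        simp [pvSeg, hc]
      | n :: t'' =>
        have hsingle : (String.ofList [n] = String.ofList [v]) ↔ n = v := by
          constructor
          · intro hh
            have := congrArg String.toList hh
            simpa using this
          · intro hh; rw [hh]
        simp only [pvSeg, List.headD_cons, hc, hsingle, ne_eq, List.cons_ne_nil, not_false_eq_true,
          List.append_ne_nil_of_right_ne_nil, List.getLastD_concat, true_and, false_and, if_false]
        by_cases hn : n = v <;> by_cases hd : c ∈ pvDigits <;>
          simp [hn, hd]

-- ===== VERDICT (by name: the statement is the Claim_ definition above) =====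
theorem number_nxt_var_spec : Claim_equal_number_nxt_var := by
  intro function var _
  unfold Spec_number_nxt_var number_nxt_var number_nxt_var_alt
  have hA : String.ofList ((function.toList.foldl (fun (st : List Char × Nat) y =>
      if st.2 < function.toList.length ∧ y ∈ pvNumbers ∧ String.ofList [function.toList.getD st.2 ' '] = var
      then (st.1 ++ [y, '*'], st.2 + 1)
      else (st.1 ++ [y], st.2 + 1)) ([], 1)).1) = String.ofList (pvSeg function.toList var) := by
    have h := pvA_loop function.toList var function.toList 0 [] (by simp)
    simp only [Nat.zero_add, List.nil_append] at h
    rw [h]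
  rw [hA]
  by_cases hv : PySem.Str.len var ≠ 1
  · rw [if_pos hv]
    have hlen : var.toList.length ≠ 1 := by
      simpa [PySem.Str.len_eq, PySem.Chars.len_eq] using hv
    rw [pvSeg_id function.toList var hlen]
    simp
  · rw [if_neg hv]
    have hlen : var.toList.length = 1 := by
      have := not_not.mp hv
      simpa [PySem.Str.len_eq, PySem.Chars.len_eq] using this
    obtain ⟨v, hvl⟩ : ∃ v, var.toList = [v] := by
      match hl : var.toList with
      | [v] => exact ⟨v, rfl⟩
      | [] => rw [hl] at hlen; simp at hlen
      | a :: b :: t => rw [hl] at hlen; simp at hlen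
    have hvar : var = String.ofList [v] := by
      rw [← hvl]; exact String.ofList_toList.symm
    simp only [hvl, PySem.List.slice_from_one, pvSplitOn_eq]
    have := pvB_run v function.toList []
    simp only [List.nil_append, ne_eq, not_true_eq_false, false_and, and_false, if_false] at this
    rw [this, ← hvar]
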